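-- pv_equiv track=rewrite | github.com/mudassir-16/aiseds | backend/risk.py | calculate_behavioral_correlation
-- ===== SOURCE A (Python) =====
-- SCAM_CORRELATION_MAP = {
--     "OTP Theft Scam": {
--         "shared_otp": 3,
--         "reuse_passwords": 2,
--         "click_unknown_links": 2,
--         "enable_2fa": 2
--     },
--     "UPI Refund Scam": {
--         "click_unknown_links": 3,
--         "verify_messages": 2,
--         "reuse_passwords": 1,
--         "verify_upi": 3
--     },
--     "Fake KYC Suspension": {
--         "verify_messages": 3,
--         "click_unknown_links": 2,
--         "public_wifi": 1
--     },
--     "Job Offer Scam": {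
--         "click_unknown_links": 2,
--         "unknown_apps": 2
--     },
--     "Prize Lottery Scam": {
--         "click_unknown_links": 3,
--         "reuse_passwords": 1
--     },
--     "Investment / Crypto Scam": {
--         "unknown_apps": 2,
--         "click_unknown_links": 2,
--         "reuse_passwords": 1
--     },
--     "Bank Account Blocked Scam": {
--         "verify_messages": 3,
--         "click_unknown_links": 3
--     }
-- }
--
-- def calculate_behavioral_correlation(user_answers: dict) -> dict:
--     scam_scores = {}
--     for scam_type, factors in SCAM_CORRELATION_MAP.items():
--         score = 0
--         for behavior, weight in factors.items():
--             if user_answers.get(behavior) == 1: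
--                 score += weight
--         scam_scores[scam_type] = score
--     return scam_scores
-- ===== SOURCE B (Python) =====
-- # Flat-array formulation: scam types get fixed slots 0..6; a behavior maps directly to its
-- # (slot, weight) contributions via an if/elif chain, and one pass over user_answers
-- # accumulates into a 7-element score array; the result dict is zipped together at the end.
--
-- _SLOT_NAMES = [
--     "OTP Theft Scam",
--     "UPI Refund Scam",
--     "Fake KYC Suspension",
--     "Job Offer Scam",
--     "Prize Lottery Scam",
--     "Investment / Crypto Scam",
--     "Bank Account Blocked Scam",
-- ]
--
-- def _behavior_slots(behavior):
--     if behavior == "shared_otp":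
--         return [(0, 3)]
--     elif behavior == "reuse_passwords":
--         return [(0, 2), (1, 1), (4, 1), (5, 1)]
--     elif behavior == "click_unknown_links":
--         return [(0, 2), (1, 3), (2, 2), (3, 2), (4, 3), (5, 2), (6, 3)]
--     elif behavior == "enable_2fa":
--         return [(0, 2)]
--     elif behavior == "verify_messages":
--         return [(1, 2), (2, 3), (6, 3)]
--     elif behavior == "verify_upi":
--         return [(1, 3)]
--     elif behavior == "public_wifi":
--         return [(2, 1)]
--     elif behavior == "unknown_apps":
--         return [(3, 2), (5, 2)]
--     else:
--         return []
--
-- def calculate_behavioral_correlation(user_answers: dict) -> dict: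
--     scores = [0, 0, 0, 0, 0, 0, 0]
--     for behavior, value in user_answers.items():
--         if value == 1:
--             for i, w in _behavior_slots(behavior):
--                 scores[i] = scores[i] + w
--     return dict(zip(_SLOT_NAMES, scores))
-- ===== Notes on version B (the rewrite author's own statement) =====
-- stated objective: alternative
-- what changed: B drops the dict-of-dicts entirely: scam types get fixed array slots 0..6, a behavior maps straight to its (slot, weight) contributions, and a single pass over user_answers accumulates into a flat 7-element score array zipped with the names at the end, instead of A's nested scan of the correlation map with a dict lookup per factor; Pre_ excludes association lists with duplicate keys, which do not encode a Python dict.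
import Mathlib
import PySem

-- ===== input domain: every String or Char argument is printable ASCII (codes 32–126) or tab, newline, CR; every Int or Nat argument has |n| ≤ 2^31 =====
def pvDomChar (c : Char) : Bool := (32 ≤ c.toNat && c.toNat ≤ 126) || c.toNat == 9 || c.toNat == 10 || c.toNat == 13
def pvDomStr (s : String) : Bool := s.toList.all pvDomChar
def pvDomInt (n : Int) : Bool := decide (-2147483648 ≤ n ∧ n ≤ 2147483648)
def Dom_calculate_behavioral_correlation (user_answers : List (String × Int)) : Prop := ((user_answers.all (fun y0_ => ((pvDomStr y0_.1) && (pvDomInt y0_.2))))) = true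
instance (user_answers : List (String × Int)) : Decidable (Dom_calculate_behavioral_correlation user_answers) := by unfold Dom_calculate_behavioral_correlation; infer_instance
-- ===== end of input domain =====

-- B replaces A's nested scan of the dict-of-dicts (one dict lookup per factor) by a flat
-- 7-slot score array filled in a single pass over user_answers, each behavior mapping
-- directly to its (slot, weight) contributions (objective: alternative decomposition).

-- ===== PORT A =====
-- SCAM_CORRELATION_MAP, as an insertion-ordered association list (dict of dicts)
def pvMap : List (String × List (String × Int)) :=
  [("OTP Theft Scam", [("shared_otp", 3), ("reuse_passwords", 2), ("click_unknown_links", 2), ("enable_2fa", 2)]),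
   ("UPI Refund Scam", [("click_unknown_links", 3), ("verify_messages", 2), ("reuse_passwords", 1), ("verify_upi", 3)]),
   ("Fake KYC Suspension", [("verify_messages", 3), ("click_unknown_links", 2), ("public_wifi", 1)]),
   ("Job Offer Scam", [("click_unknown_links", 2), ("unknown_apps", 2)]),
   ("Prize Lottery Scam", [("click_unknown_links", 3), ("reuse_passwords", 1)]),
   ("Investment / Crypto Scam", [("unknown_apps", 2), ("click_unknown_links", 2), ("reuse_passwords", 1)]),
   ("Bank Account Blocked Scam", [("verify_messages", 3), ("click_unknown_links", 3)])]

def calculate_behavioral_correlation (user_answers : List (String × Int)) : List (String × Int) :=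
  -- scam_scores = {}; for scam_type, factors in ...: score = 0; for behavior, weight in ...:
  --   if user_answers.get(behavior) == 1: score += weight;  scam_scores[scam_type] = score
  (pvMap.foldl (fun (scam_scores : PySem.Dict String Int) p =>
      scam_scores.insert p.1 (p.2.foldl (fun score q =>
        if (PySem.Dict.mk user_answers).get? q.1 == some 1 then score + q.2 else score) 0))
    PySem.Dict.empty).items

-- ===== PORT B =====
-- _SLOT_NAMES
def pvSlotNames : List String :=
  ["OTP Theft Scam", "UPI Refund Scam", "Fake KYC Suspension", "Job Offer Scam",
   "Prize Lottery Scam", "Investment / Crypto Scam", "Bank Account Blocked Scam"]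

-- _behavior_slots: behavior -> [(slot, weight), ...], the if/elif chain of Source B
def pvBehaviorSlots (behavior : String) : List (Nat × Int) :=
  if behavior = "shared_otp" then [(0, 3)]
  else if behavior = "reuse_passwords" then [(0, 2), (1, 1), (4, 1), (5, 1)]
  else if behavior = "click_unknown_links" then [(0, 2), (1, 3), (2, 2), (3, 2), (4, 3), (5, 2), (6, 3)]
  else if behavior = "enable_2fa" then [(0, 2)]
  else if behavior = "verify_messages" then [(1, 2), (2, 3), (6, 3)]
  else if behavior = "verify_upi" then [(1, 3)]
  else if behavior = "public_wifi" then [(2, 1)]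
  else if behavior = "unknown_apps" then [(3, 2), (5, 2)]
  else []

def calculate_behavioral_correlation_alt (user_answers : List (String × Int)) : List (String × Int) :=
  -- scores = [0]*7; for behavior, value in ...: if value == 1:
  --   for i, w in _behavior_slots(behavior): scores[i] = scores[i] + w
  -- (every slot index is 0..6, so scores[i] is always in range: List.getD/set are exact here)
  let scores := user_answers.foldl (fun (scores : List Int) p =>
      if p.2 == 1 then
        (pvBehaviorSlots p.1).foldl (fun (scores : List Int) q =>
          scores.set q.1 (scores.getD q.1 0 + q.2)) scores
      else scores) [0, 0, 0, 0, 0, 0, 0]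
  -- return dict(zip(_SLOT_NAMES, scores)): names are distinct, so the dict is the zipped pairs
  pvSlotNames.zip scores

-- ===== PRECONDITION & SPEC =====
-- Pre_ excludes association lists with duplicate keys: they do not encode a Python dict
-- (both Pythons take a dict), and on them B's single pass would count a behavior once per entry.
def Pre_calculate_behavioral_correlation (user_answers : List (String × Int)) : Prop :=
  (user_answers.map Prod.fst).Nodup
instance (user_answers : List (String × Int)) : Decidable (Pre_calculate_behavioral_correlation user_answers) := by unfold Pre_calculate_behavioral_correlation; infer_instance

def pvWitness_calculate_behavioral_correlation : (List (String × Int)) :=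
  [("shared_otp", 1), ("click_unknown_links", 0), ("public_wifi", 1)]

def Spec_calculate_behavioral_correlation (user_answers : List (String × Int)) (out : List (String × Int)) : Prop := out = calculate_behavioral_correlation_alt user_answers
instance (user_answers : List (String × Int)) (out : List (String × Int)) : Decidable (Spec_calculate_behavioral_correlation user_answers out) := by unfold Spec_calculate_behavioral_correlation; infer_instance

-- ===== CLAIM (what is proved, stated in full; the proofs are below) =====
def Claim_equal_calculate_behavioral_correlation : Prop := ∀ (user_answers : List (String × Int)), Dom_calculate_behavioral_correlation user_answers → Pre_calculate_behavioral_correlation user_answers → Spec_calculate_behavioral_correlation user_answers (calculate_behavioral_correlation user_answers)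

-- ===== LEMMAS AND PROOFS =====

-- the i-th factor list of the map
def pvGF (i : Nat) : List (String × Int) := (pvMap.getD i ("", [])).2

-- weight of behavior b in a factor list
def pvW (F : List (String × Int)) (b : String) : Int := (PySem.Dict.mk F).getD b 0

-- total contribution of answers l to one scam type with weight function f
def pvC (f : String → Int) (l : List (String × Int)) : Int :=
  (l.map (fun p => if p.2 == 1 then f p.1 else 0)).sum

-- A's inner loop for one factor list, as a function of the answers
def pvA (ua F : List (String × Int)) : Int :=
  F.foldl (fun score q => if (PySem.Dict.mk ua).get? q.1 == some 1 then score + q.2 else score) 0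

-- one step of B's answer loop on a 7-element score list adds each slot's weight for that behavior
theorem pvStepB (b : String) (v : Int) (a1 a2 a3 a4 a5 a6 a7 : Int) :
    (if v == 1 then
        (pvBehaviorSlots b).foldl (fun (scores : List Int) q =>
          scores.set q.1 (scores.getD q.1 0 + q.2)) [a1, a2, a3, a4, a5, a6, a7]
      else [a1, a2, a3, a4, a5, a6, a7])
    = [a1 + if v == 1 then pvW (pvGF 0) b else 0,
       a2 + if v == 1 then pvW (pvGF 1) b else 0,
       a3 + if v == 1 then pvW (pvGF 2) b else 0,
       a4 + if v == 1 then pvW (pvGF 3) b else 0,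
       a5 + if v == 1 then pvW (pvGF 4) b else 0,
       a6 + if v == 1 then pvW (pvGF 5) b else 0,
       a7 + if v == 1 then pvW (pvGF 6) b else 0] := by
  by_cases hv : (v == 1) = true
  · unfold pvBehaviorSlots
    simp only [hv, if_true]
    split_ifs with h1 h2 h3 h4 h5 h6 h7 h8 <;>
      try (subst b;
           simp [pvW, pvGF, pvMap, List.find?, List.set, List.getD, PySem.Dict.getD,
             PySem.Dict.get?])
    have hne : ∀ s : String, ¬ b = s → (s == b) = false := by
      intro s h
      simp only [beq_eq_false_iff_ne, ne_eq]
      exact fun e => h e.symm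
    simp [pvW, pvGF, pvMap, List.find?, PySem.Dict.getD, PySem.Dict.get?,
      hne _ h1, hne _ h2, hne _ h3, hne _ h4, hne _ h5, hne _ h6, hne _ h7, hne _ h8]
  · simp [hv]

-- B's whole answer loop on a 7-element score list
theorem pvFoldB (l : List (String × Int)) (a1 a2 a3 a4 a5 a6 a7 : Int) :
    l.foldl (fun (scores : List Int) p =>
        if p.2 == 1 then
          (pvBehaviorSlots p.1).foldl (fun (scores : List Int) q =>
            scores.set q.1 (scores.getD q.1 0 + q.2)) scores
        else scores) [a1, a2, a3, a4, a5, a6, a7]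
    = [a1 + pvC (pvW (pvGF 0)) l, a2 + pvC (pvW (pvGF 1)) l,
       a3 + pvC (pvW (pvGF 2)) l, a4 + pvC (pvW (pvGF 3)) l,
       a5 + pvC (pvW (pvGF 4)) l, a6 + pvC (pvW (pvGF 5)) l,
       a7 + pvC (pvW (pvGF 6)) l] := by
  induction l generalizing a1 a2 a3 a4 a5 a6 a7 with
  | nil => simp [pvC]
  | cons p t ih =>
    rw [List.foldl_cons, pvStepB p.1 p.2, ih]
    simp only [pvC, List.map_cons, List.sum_cons, List.cons.injEq, and_true]
    refine ⟨?_, ?_, ?_, ?_, ?_, ?_, ?_⟩ <;> ring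

-- A's inner loop as a sum
theorem pvA_sum (ua F : List (String × Int)) :
    pvA ua F = (F.map (fun q => if (PySem.Dict.mk ua).get? q.1 == some 1 then q.2 else 0)).sum := by
  unfold pvA
  rw [show (fun (score : Int) (q : String × Int) =>
        if (PySem.Dict.mk ua).get? q.1 == some 1 then score + q.2 else score)
      = (fun (score : Int) (q : String × Int) =>
        score + if (PySem.Dict.mk ua).get? q.1 == some 1 then q.2 else 0) from
    funext fun s => funext fun q => by split <;> simp]
  simpa using PySem.List.foldl_add F _ 0

-- a behavior absent from F's keys never hits the peeled-off branch
theorem pvK (F : List (String × Int)) (b : String) (v : Int) (t : List (String × Int))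
    (hb : b ∉ F.map Prod.fst) :
    (F.map (fun q => if (if b == q.1 then some v else (PySem.Dict.mk t).get? q.1) == some 1
        then q.2 else 0)).sum
    = (F.map (fun q => if (PySem.Dict.mk t).get? q.1 == some 1 then q.2 else 0)).sum := by
  congr 1
  refine List.map_congr_left (fun q hq => ?_)
  have h : ¬ b = q.1 := fun h => hb (h ▸ List.mem_map_of_mem hq)
  simp [h]

-- peeling one fresh answer (b, v) off the dict changes A's sum by b's weight when v == 1
theorem pvH (t : List (String × Int)) (b : String) (v : Int) (F : List (String × Int)) :
    (F.map Prod.fst).Nodup → (PySem.Dict.mk t).get? b = none →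
    (F.map (fun q => if (if b == q.1 then some v else (PySem.Dict.mk t).get? q.1) == some 1
        then q.2 else 0)).sum
    = (if v == 1 then pvW F b else 0)
      + (F.map (fun q => if (PySem.Dict.mk t).get? q.1 == some 1 then q.2 else 0)).sum := by
  induction F with
  | nil =>
    intro _ _
    simp [pvW, PySem.Dict.getD_eq_get?_getD, PySem.Dict.get?]
  | cons q0 rest ih =>
    rcases q0 with ⟨k, w⟩
    intro hF hnone
    rw [List.map_cons] at hF
    obtain ⟨hk, hrest⟩ := List.nodup_cons.mp hF
    by_cases hb : b = k
    · have hb' : (b == k) = true := by simp [hb]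
      have hk' : ((k : String) == b) = true := by simp [hb]
      rw [List.map_cons, List.sum_cons, List.map_cons, List.sum_cons,
        pvK rest b v t (by simpa [hb] using hk)]
      have hW : pvW ((k, w) :: rest) b = w := by
        simp [pvW, PySem.Dict.getD_eq_get?_getD, PySem.Dict.get?_mk_cons, hk']
      rw [hW]
      have hg : (PySem.Dict.mk t).get? k = none := hb ▸ hnone
      rw [hg, hb']
      simp only [if_true]
      have hvv : ((some v == some (1 : Int))) = (v == 1) := by simp
      rw [hvv]
      split <;> simp
    · have hb1 : (b == k) = false := by simp [hb]
      have hW : pvW ((k, w) :: rest) b = pvW rest b := by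
        have h2 : ((k : String) == b) = false := by
          simp only [beq_eq_false_iff_ne, ne_eq]
          exact fun h => hb h.symm
        simp [pvW, PySem.Dict.getD_eq_get?_getD, PySem.Dict.get?_mk_cons, h2]
      rw [List.map_cons, List.sum_cons, List.map_cons, List.sum_cons, hb1, ih hrest hnone, hW]
      simp only [Bool.false_eq_true, if_false]
      ring

-- the crux: B's contribution sum equals A's lookup sum on duplicate-free answers
theorem pvG (F : List (String × Int)) (hF : (F.map Prod.fst).Nodup)
    (ua : List (String × Int)) :
    (ua.map Prod.fst).Nodup → pvC (pvW F) ua = pvA ua F := by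
  rw [pvA_sum]
  induction ua with
  | nil =>
    intro _
    simp [pvC, PySem.Dict.get?]
  | cons p t ih =>
    rcases p with ⟨b, v⟩
    intro hua
    rw [List.map_cons] at hua
    obtain ⟨hb, ht⟩ := List.nodup_cons.mp hua
    have hnone : (PySem.Dict.mk t).get? b = none := by
      rw [PySem.Dict.get?_eq_none_iff_not_mem_keys]
      simpa [PySem.Dict.keys] using hb
    simp only [pvC, List.map_cons, List.sum_cons, PySem.Dict.get?_mk_cons]
    rw [pvH t b v F hF hnone]
    have htl := ih ht
    simp only [pvC] at htl
    rw [htl]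

-- ===== VERDICT (by name: the statement is the Claim_ definition above) =====
theorem calculate_behavioral_correlation_spec : Claim_equal_calculate_behavioral_correlation := by
  intro ua _ hpre
  unfold Spec_calculate_behavioral_correlation
  have hA : calculate_behavioral_correlation ua =
      [("OTP Theft Scam", pvA ua (pvGF 0)), ("UPI Refund Scam", pvA ua (pvGF 1)),
       ("Fake KYC Suspension", pvA ua (pvGF 2)), ("Job Offer Scam", pvA ua (pvGF 3)),
       ("Prize Lottery Scam", pvA ua (pvGF 4)), ("Investment / Crypto Scam", pvA ua (pvGF 5)),
       ("Bank Account Blocked Scam", pvA ua (pvGF 6))] := rfl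
  have hB : calculate_behavioral_correlation_alt ua =
      pvSlotNames.zip (ua.foldl (fun (scores : List Int) p =>
        if p.2 == 1 then
          (pvBehaviorSlots p.1).foldl (fun (scores : List Int) q =>
            scores.set q.1 (scores.getD q.1 0 + q.2)) scores
        else scores) [0, 0, 0, 0, 0, 0, 0]) := rfl
  rw [hA, hB, pvFoldB]
  have hpre' : (ua.map Prod.fst).Nodup := hpre
  simp only [pvSlotNames, List.zip, List.zipWith, zero_add, List.cons.injEq, Prod.mk.injEq,
    true_and, and_true]
  refine ⟨?_, ?_, ?_, ?_, ?_, ?_, ?_⟩ <;> exact (pvG _ (by decide) ua hpre').symm
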